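-- pv_equiv track=rewrite | github.com/vasmarfas/bambuddy | backend/app/services/ldap_service.py | resolve_group_mapping
-- ===== SOURCE A (Python) =====
-- def resolve_group_mapping(ldap_groups: list[str], group_mapping: dict[str, str]) -> list[str]:
--     """Map LDAP group DNs to BamBuddy group names.
--
--     Returns list of BamBuddy group names that the user should be added to.
--     Comparison is case-insensitive on the LDAP group DN.
--     """
--     if not group_mapping:
--         return []
--
--     # Build case-insensitive lookup
--     mapping_lower = {k.lower(): v for k, v in group_mapping.items()}
--     result = []
--     for ldap_group in ldap_groups:
--         bambuddy_group = mapping_lower.get(ldap_group.lower())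
--         if bambuddy_group:
--             result.append(bambuddy_group)
--     return result
-- ===== SOURCE B (Python) =====
-- def resolve_group_mapping(ldap_groups: list[str], group_mapping: dict[str, str]) -> list[str]:
--     """Map LDAP group DNs to BamBuddy group names, case-insensitively on the DN."""
--     result = []
--     for ldap_group in ldap_groups:
--         target = ldap_group.lower()
--         name = next((v for k, v in group_mapping.items() if k.lower() == target), None)
--         if name:
--             result.append(name)
--     return result
-- ===== Notes on version B (the rewrite author's own statement) =====
-- stated objective: simpler
-- what changed: Replaces the prebuilt lowercased lookup dict with a direct first-match scan of the mapping per LDAP group; Pre_ excludes mappings whose keys collide case-insensitively, where A's dict-comprehension last-wins overwrite is accidental and first-vs-last match is anybody's choice.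
-- outside the precondition, e.g. on resolve_group_mapping(['CN=Admins'], {'cn=ADMINS': 'x', 'CN=admins': 'y'}): A returns ['y'], B returns ['x']
import Mathlib
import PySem

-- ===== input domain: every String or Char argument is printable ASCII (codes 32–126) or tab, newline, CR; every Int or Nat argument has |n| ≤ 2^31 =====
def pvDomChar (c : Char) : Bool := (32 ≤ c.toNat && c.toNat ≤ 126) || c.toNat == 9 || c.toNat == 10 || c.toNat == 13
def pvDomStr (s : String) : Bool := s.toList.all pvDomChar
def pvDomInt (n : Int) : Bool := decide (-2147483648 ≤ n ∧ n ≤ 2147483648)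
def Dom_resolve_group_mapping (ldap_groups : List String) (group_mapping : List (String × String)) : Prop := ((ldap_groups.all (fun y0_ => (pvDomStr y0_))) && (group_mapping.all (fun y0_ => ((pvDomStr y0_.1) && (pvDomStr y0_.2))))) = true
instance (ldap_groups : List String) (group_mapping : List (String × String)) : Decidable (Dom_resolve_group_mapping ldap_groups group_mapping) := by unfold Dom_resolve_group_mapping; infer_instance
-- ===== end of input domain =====

-- B replaces A's prebuilt lowercased lookup dict with a direct first-match scan of the
-- mapping per LDAP group (objective: simpler; no speed claim).

-- ===== PORT A =====
def resolve_group_mapping (ldap_groups : List String) (group_mapping : List (String × String)) : List String :=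
  if group_mapping = [] then []
  else
    -- mapping_lower = {k.lower(): v for k, v in group_mapping.items()}
    let mapping_lower : PySem.Dict String String :=
      group_mapping.foldl (fun d p => d.insert (PySem.Str.lower p.1) p.2) PySem.Dict.empty
    -- for ldap_group in ldap_groups: if mapping_lower.get(ldap_group.lower()): append
    ldap_groups.foldl (fun result ldap_group =>
      match mapping_lower.get? (PySem.Str.lower ldap_group) with
      | some v => if v ≠ "" then result ++ [v] else result
      | none => result) []

-- ===== PORT B =====
-- next((v for k, v in group_mapping.items() if k.lower() == target), None)
def pvFirstMatch (target : String) (group_mapping : List (String × String)) : Option String :=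
  match group_mapping with
  | [] => none
  | p :: rest => if PySem.Str.lower p.1 == target then some p.2 else pvFirstMatch target rest

def resolve_group_mapping_alt (ldap_groups : List String) (group_mapping : List (String × String)) : List String :=
  ldap_groups.foldl (fun result ldap_group =>
    match pvFirstMatch (PySem.Str.lower ldap_group) group_mapping with
    | some v => if v ≠ "" then result ++ [v] else result
    | none => result) []

-- ===== PRECONDITION & SPEC =====
-- Pre_ excludes mappings with case-colliding keys, on which A's dict-comprehension
-- last-wins overwrite is accidental (first-vs-last match on duplicates is anybody's choice).
def Pre_resolve_group_mapping (ldap_groups : List String) (group_mapping : List (String × String)) : Prop :=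
  (group_mapping.map (fun p => PySem.Str.lower p.1)).Nodup
instance (ldap_groups : List String) (group_mapping : List (String × String)) : Decidable (Pre_resolve_group_mapping ldap_groups group_mapping) := by unfold Pre_resolve_group_mapping; infer_instance

def pvWitness_resolve_group_mapping : List String × (List (String × String)) :=
  (["CN=Admins,DC=x", "CN=Other"], [("cn=admins,dc=x", "admin"), ("cn=users", "user")])

def Spec_resolve_group_mapping (ldap_groups : List String) (group_mapping : List (String × String)) (out : List String) : Prop := out = resolve_group_mapping_alt ldap_groups group_mapping
instance (ldap_groups : List String) (group_mapping : List (String × String)) (out : List String) : Decidable (Spec_resolve_group_mapping ldap_groups group_mapping out) := by unfold Spec_resolve_group_mapping; infer_instance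

-- ===== CLAIM =====
def Claim_equal_resolve_group_mapping : Prop := ∀ (ldap_groups : List String) (group_mapping : List (String × String)), Dom_resolve_group_mapping ldap_groups group_mapping → Pre_resolve_group_mapping ldap_groups group_mapping → Spec_resolve_group_mapping ldap_groups group_mapping (resolve_group_mapping ldap_groups group_mapping)

-- ===== LEMMAS AND PROOFS =====

-- lookup in the insert-built lowercase dict = last case-insensitive match in the list
theorem pv_get_foldl_insert (gm : List (String × String)) (d : PySem.Dict String String) (t : String) :
    (gm.foldl (fun d p => d.insert (PySem.Str.lower p.1) p.2) d).get? t
      = gm.foldl (fun value p => if PySem.Str.lower p.1 == t then some p.2 else value) (d.get? t) := by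
  induction gm generalizing d with
  | nil => rfl
  | cons p rest ih =>
      simp only [List.foldl_cons, ih, PySem.Dict.get?_insert]
      by_cases h : PySem.Str.lower p.1 = t
      · simp [h]
      · simp [h, Ne.symm h]

theorem pv_foldl_no_match (gm : List (String × String)) (t : String) (init : Option String)
    (h : ∀ q ∈ gm, PySem.Str.lower q.1 ≠ t) :
    gm.foldl (fun value p => if PySem.Str.lower p.1 == t then some p.2 else value) init = init := by
  induction gm generalizing init with
  | nil => rfl
  | cons p rest ih =>
      have hp := h p (List.mem_cons_self ..)
      rw [List.foldl_cons, if_neg (by simpa using hp)]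
      exact ih init (fun q hq => h q (List.mem_cons_of_mem _ hq))

-- under case-distinct keys, first match = the last-match fold
theorem pv_firstMatch_eq_foldl (gm : List (String × String)) (t : String)
    (h : (gm.map (fun p => PySem.Str.lower p.1)).Nodup) :
    pvFirstMatch t gm
      = gm.foldl (fun value p => if PySem.Str.lower p.1 == t then some p.2 else value) none := by
  induction gm with
  | nil => rfl
  | cons p rest ih =>
      simp only [List.map_cons, List.nodup_cons, List.mem_map] at h
      obtain ⟨hp, hrest⟩ := h
      simp only [pvFirstMatch, List.foldl_cons]
      by_cases ht : PySem.Str.lower p.1 = t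
      · subst ht
        rw [pv_foldl_no_match]
        · simp
        · intro q hq he
          exact hp ⟨q, hq, he⟩
      · rw [if_neg (by simpa using ht), if_neg (by simpa using ht)]
        exact ih hrest

theorem pv_alt_nil (lg : List String) : resolve_group_mapping_alt lg [] = [] := by
  induction lg with
  | nil => rfl
  | cons g rest ih =>
      simp only [resolve_group_mapping_alt, pvFirstMatch, List.foldl_cons] at ih ⊢
      simpa using ih

-- ===== VERDICT =====
theorem resolve_group_mapping_spec : Claim_equal_resolve_group_mapping := by
  intro lg gm _ hpre
  unfold Spec_resolve_group_mapping resolve_group_mapping resolve_group_mapping_alt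
  by_cases h : gm = []
  · simpa [h] using (pv_alt_nil lg).symm
  · simp only [h, if_false]
    congr 1
    funext res g
    rw [pv_firstMatch_eq_foldl _ _ hpre, pv_get_foldl_insert]
    rfl
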